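-- pv_equiv track=rewrite | github.com/MaksimTy/Example | src/main/python/validator.py | letterIndexToIntValue
-- ===== SOURCE A (Python) =====
-- def letterIndexToIntValue(characters):
--     letters = characters.upper()
--     a = ord("A") - 1
--     z = ord("Z") - a
--     unicodes = [(ord(letter) - a) for letter in letters]
--     alphabet = [*range(1, z + 1)]
--     unicodes = list(filter(lambda code: code in alphabet, unicodes))
--     unicodes.reverse()
--     value = 0
--     for i in range(len(unicodes)):
--         value += pow(z, i) * unicodes[i]
--     return value
-- ===== SOURCE B (Python) =====
-- def letterIndexToIntValue(characters):
--     value = 0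
--     for ch in characters.upper():
--         code = ord(ch) - 64
--         if 1 <= code <= 26:
--             value = value * 26 + code
--     return value
-- ===== Notes on version B (the rewrite author's own statement) =====
-- stated objective: simpler
-- what changed: Replaced build-list / membership-scan-in-a-26-element-list / reverse / power-sum with a single left-to-right Horner fold (value = value*26 + code) over the uppercased characters, filtering inline.
import Mathlib
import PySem

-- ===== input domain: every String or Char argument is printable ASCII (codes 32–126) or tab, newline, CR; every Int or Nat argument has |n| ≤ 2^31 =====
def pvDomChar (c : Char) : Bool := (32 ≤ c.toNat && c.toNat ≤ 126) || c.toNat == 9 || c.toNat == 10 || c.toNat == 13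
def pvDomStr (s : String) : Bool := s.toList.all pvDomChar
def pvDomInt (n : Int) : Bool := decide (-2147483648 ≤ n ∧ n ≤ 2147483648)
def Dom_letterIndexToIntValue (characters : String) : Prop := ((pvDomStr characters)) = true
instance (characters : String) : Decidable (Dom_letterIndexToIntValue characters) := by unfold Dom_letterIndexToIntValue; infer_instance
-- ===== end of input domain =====

-- B replaces A's list-building, membership scan, reverse and power sum by one Horner fold (simpler, one pass).

-- ===== PORT A =====
def letterIndexToIntValue (characters : String) : Int :=
  let letters := PySem.Str.upper characters
  let a : Int := 65 - 1                       -- ord("A") - 1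
  let z : Int := 90 - a                       -- ord("Z") - a
  let unicodes := letters.toList.map (fun letter => (letter.toNat : Int) - a)
  let alphabet := PySem.List.pyRange 1 (z + 1) 1
  let unicodes2 := unicodes.filter (fun code => alphabet.contains code)
  let unicodes3 := unicodes2.reverse
  (PySem.List.pyRange 0 (PySem.List.len unicodes3) 1).foldl
    (fun value i => value + z ^ i.toNat * PySem.List.pyGetD unicodes3 i 0) 0

-- ===== PORT B =====
def letterIndexToIntValue_alt (characters : String) : Int :=
  (PySem.Str.upper characters).toList.foldl
    (fun value ch =>
      let code : Int := (ch.toNat : Int) - 64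
      if 1 ≤ code ∧ code ≤ 26 then value * 26 + code else value) 0

-- ===== PRECONDITION & SPEC =====
def Spec_letterIndexToIntValue (characters : String) (out : Int) : Prop := out = letterIndexToIntValue_alt characters
instance (characters : String) (out : Int) : Decidable (Spec_letterIndexToIntValue characters out) := by unfold Spec_letterIndexToIntValue; infer_instance

-- ===== CLAIM (what is proved, stated in full; the proofs are below) =====
def Claim_equal_letterIndexToIntValue : Prop := ∀ (characters : String), Dom_letterIndexToIntValue characters → Spec_letterIndexToIntValue characters (letterIndexToIntValue characters)

-- ===== LEMMAS AND PROOFS =====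

-- positional value, least-significant digit first: A's power sum in recursive form
def pvPoly : List Int → Int
  | [] => 0
  | x :: t => x + 26 * pvPoly t

theorem pvPoly_append_singleton (v : List Int) (x : Int) :
    pvPoly (v ++ [x]) = pvPoly v + x * 26 ^ v.length := by
  induction v with
  | nil => simp [pvPoly]
  | cons y t ih => simp [pvPoly, ih]; ring

-- A's indexed power-sum loop equals pvPoly
theorem pvSum_eq_poly (u : List Int) :
    ((List.range u.length).map (fun k => 26 ^ k * u.getD k 0)).sum = pvPoly u := by
  induction u with
  | nil => simp [pvPoly]
  | cons x t ih =>
    rw [List.length_cons, List.range_succ_eq_map]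
    simp only [List.map_cons, List.map_map, List.sum_cons]
    have : ((List.range t.length).map (((fun k => 26 ^ k * (x :: t).getD k 0)) ∘ (· + 1))).sum
        = 26 * ((List.range t.length).map (fun k => 26 ^ k * t.getD k 0)).sum := by
      rw [← List.sum_map_mul_left]
      congr 1
      apply List.map_congr_left
      intro k _
      simp [Function.comp, List.getD]
      ring
    rw [this, ih]
    simp [pvPoly]

-- B's Horner fold equals pvPoly of the reversed digit list
theorem pvHorner_eq_poly_reverse (l : List Int) (acc : Int) :
    l.foldl (fun v c => v * 26 + c) acc = acc * 26 ^ l.length + pvPoly l.reverse := by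
  induction l generalizing acc with
  | nil => simp [pvPoly]
  | cons x t ih =>
    rw [List.foldl_cons, ih, List.reverse_cons, pvPoly_append_singleton]
    simp [pow_succ]
    ring

-- B's filtering fold equals the Horner fold over the filtered mapped codes
theorem pvFold_filter (cs : List Char) (acc : Int) :
    cs.foldl (fun value ch =>
        let code : Int := (ch.toNat : Int) - 64
        if 1 ≤ code ∧ code ≤ 26 then value * 26 + code else value) acc
      = ((cs.map (fun ch => (ch.toNat : Int) - 64)).filter
          (fun code => decide (1 ≤ code) && decide (code ≤ 26))).foldl
          (fun v c => v * 26 + c) acc := by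
  induction cs generalizing acc with
  | nil => rfl
  | cons c t ih =>
    rw [List.map_cons, List.filter_cons]
    simp only [List.foldl_cons]
    by_cases h : 1 ≤ (c.toNat : Int) - 64 ∧ (c.toNat : Int) - 64 ≤ 26
    · rw [if_pos h, if_pos (by simpa using h), List.foldl_cons]
      exact ih _
    · rw [if_neg h, if_neg (by simpa using h)]
      exact ih _

theorem pv_contains_iff (code : Int) :
    (PySem.List.pyRange 1 27 1).contains code
      = (decide (1 ≤ code) && decide (code ≤ 26)) := by
  rw [Bool.eq_iff_iff]
  simp only [List.contains_iff_mem, PySem.List.mem_pyRange_one, Bool.and_eq_true,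
    decide_eq_true_iff]
  omega

-- ===== VERDICT (by name: the statement is the Claim_ definition above) =====
theorem letterIndexToIntValue_spec : Claim_equal_letterIndexToIntValue := by
  intro characters _
  unfold Spec_letterIndexToIntValue letterIndexToIntValue letterIndexToIntValue_alt
  simp only []
  have e2 : (90 - (65 - 1) : Int) = 26 := by norm_num
  have e1 : (65 - 1 : Int) = 64 := by norm_num
  rw [e2, e1]
  have e3 : (26 + 1 : Int) = 27 := by norm_num
  rw [e3]
  set cs := (PySem.Str.upper characters).toList with hcs
  set codes := ((cs.map (fun ch => (ch.toNat : Int) - 64)).filter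
      (fun code => decide (1 ≤ code) && decide (code ≤ 26))) with hcodes
  have hfilter : (cs.map (fun letter => (letter.toNat : Int) - 64)).filter
      (fun code => (PySem.List.pyRange 1 27 1).contains code) = codes := by
    rw [hcodes]
    apply List.filter_congr
    intro x _
    exact pv_contains_iff x
  rw [hfilter]
  -- A's power-sum loop over codes.reverse equals pvPoly
  have hA : (PySem.List.pyRange 0 (PySem.List.len codes.reverse) 1).foldl
      (fun value i => value + (26 : Int) ^ i.toNat * PySem.List.pyGetD codes.reverse i 0) 0
      = pvPoly codes.reverse := by
    set u := codes.reverse with hu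
    rw [PySem.List.len_eq, PySem.List.pyRange_zero_nat, List.foldl_map]
    have hcong := PySem.List.foldl_congr_mem (List.range u.length)
        (fun v k => v + (26 : Int) ^ ((k : Int)).toNat * PySem.List.pyGetD u (k : Int) 0)
        (fun v k => v + (26 : Int) ^ k * u.getD k 0) 0
        (by intro acc x _; simp [PySem.List.pyGetD_natCast])
    rw [hcong, PySem.List.foldl_add, zero_add, pvSum_eq_poly]
  rw [hA, pvFold_filter, ← hcodes, pvHorner_eq_poly_reverse]
  simp only [zero_mul, zero_add]
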